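-- pv_equiv track=rewrite | github.com/ronip31/Fatorial_SuperFatorial | app.py | super_fatorial
-- ===== SOURCE A (Python) =====
-- def super_fatorial(numero):
--     if not isinstance(numero, int):
--         return "Número deve ser um número inteiro."
--     elif numero < 0:
--         return "Número deve ser não-negativo."
--     elif numero == 0 or numero == 1:
--         return 1
--     else:
--         val = 1
--         ans = []
--         for i in range(1, numero + 1):
--             val *= i
--             ans.append(val)
--         arr = [1]
--         for i in range(1, len(ans)):
--             arr.append(arr[-1] * ans[i])
--         return arr
-- ===== SOURCE B (Python) =====
-- def super_fatorial(numero):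
--     if not isinstance(numero, int):
--         return "Número deve ser um número inteiro."
--     elif numero < 0:
--         return "Número deve ser não-negativo."
--     elif numero == 0 or numero == 1:
--         return 1
--     else:
--         fact = 1
--         sf = 1
--         result = []
--         for i in range(1, numero + 1):
--             fact *= i
--             sf *= fact
--             result.append(sf)
--         return result
-- ===== Notes on version B (the rewrite author's own statement) =====
-- stated objective: simpler
-- what changed: On the list-returning branch the two sequential loops (build the full factorial list, then re-scan it multiplying into a second list) are replaced by one single pass that maintains only two scalars (running factorial and running superfactorial) and appends directly to the result; the intermediate list ans disappears. Pre_ keeps exactly the inputs on which A returns a list: for smaller inputs A returns the int one or an error string, not a list of ints.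
-- outside the precondition, e.g. on super_fatorial(1): A returns 1, B returns 1; on super_fatorial(0): A returns 1, B returns 1; on super_fatorial(-3): A returns 'Número deve ser não-negativo.', B returns 'Número deve ser não-negativo.'
import Mathlib
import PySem

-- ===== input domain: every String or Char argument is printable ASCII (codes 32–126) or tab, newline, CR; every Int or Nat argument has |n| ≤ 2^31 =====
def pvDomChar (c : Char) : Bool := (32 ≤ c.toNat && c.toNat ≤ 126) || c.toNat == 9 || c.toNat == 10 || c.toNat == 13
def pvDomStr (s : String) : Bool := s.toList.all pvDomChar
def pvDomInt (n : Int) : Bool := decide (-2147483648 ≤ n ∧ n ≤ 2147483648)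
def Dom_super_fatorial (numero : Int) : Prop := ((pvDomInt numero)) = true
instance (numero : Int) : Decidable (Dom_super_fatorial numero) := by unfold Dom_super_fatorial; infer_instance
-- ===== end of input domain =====

-- B replaces A's two sequential loops (materialise the factorial list, re-scan it
-- into a running-product list) with one single pass keeping two scalars; simpler, same cost.

-- ===== PORT A =====
-- Guards for non-int / negative / 0 / 1 return a string or the int 1 in Python (not a
-- list); those inputs are outside Pre_ and the port returns [] there.
def super_fatorial (numero : Int) : List Int :=
  if numero < 0 then []
  else if numero = 0 ∨ numero = 1 then []
  else
    let s := (PySem.List.pyRange 1 (numero + 1) 1).foldl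
      (fun (p : Int × List Int) i => (p.1 * i, p.2 ++ [p.1 * i])) (1, [])
    let ans := s.2
    -- arr[-1]: exact via pyGetD since arr is never empty (starts as [1])
    (PySem.List.pyRange 1 (ans.length : Int) 1).foldl
      (fun (arr : List Int) i =>
        arr ++ [(PySem.List.pyGetD arr (-1) 0) * PySem.List.pyGetD ans i 0]) [1]

-- ===== PORT B =====
def super_fatorial_alt (numero : Int) : List Int :=
  if numero < 0 then []
  else if numero = 0 ∨ numero = 1 then []
  else
    ((PySem.List.pyRange 1 (numero + 1) 1).foldl
      (fun (s : Int × Int × List Int) i =>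
        let fact := s.1 * i
        let sf := s.2.1 * fact
        (fact, sf, s.2.2 ++ [sf])) (1, 1, [])).2.2

-- ===== PRECONDITION & SPEC =====
-- Pre_ excludes numero ≤ 1: there Python A returns the int 1 (for 0/1) or an error
-- string (negative), not a list of ints, so no List Int claim applies.
def Pre_super_fatorial (numero : Int) : Prop := 2 ≤ numero
instance (numero : Int) : Decidable (Pre_super_fatorial numero) := by unfold Pre_super_fatorial; infer_instance
def pvWitness_super_fatorial : Int := 4
def Spec_super_fatorial (numero : Int) (out : List Int) : Prop := out = super_fatorial_alt numero
instance (numero : Int) (out : List Int) : Decidable (Spec_super_fatorial numero out) := by unfold Spec_super_fatorial; infer_instance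

-- ===== CLAIM =====
def Claim_equal_super_fatorial : Prop := ∀ (numero : Int), Dom_super_fatorial numero → Pre_super_fatorial numero → Spec_super_fatorial numero (super_fatorial numero)

-- ===== LEMMAS AND PROOFS =====

-- factorial (as Int) and running superfactorial prefix product
def pvF : Nat → Int
  | 0 => 1
  | n + 1 => pvF n * ((n : Int) + 1)

def pvSf : Nat → Int
  | 0 => 1
  | n + 1 => pvSf n * pvF (n + 1)

-- A's first loop produces (n!, [1!, 2!, …, n!])
theorem loopA1_eq (n : Nat) :
    (PySem.List.pyRange 1 ((n : Int) + 1) 1).foldl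
      (fun (p : Int × List Int) i => (p.1 * i, p.2 ++ [p.1 * i])) (1, [])
    = (pvF n, (List.range n).map (fun k => pvF (k + 1))) := by
  induction n with
  | zero => simp [PySem.List.pyRange_one_eq_nil, pvF]
  | succ n ih =>
    have h : PySem.List.pyRange 1 ((↑(n + 1) : Int) + 1) 1
        = PySem.List.pyRange 1 ((n : Int) + 1) 1 ++ [(n : Int) + 1] := by
      have := PySem.List.pyRange_one_succ_right (a := 1) (b := (n : Int) + 1) (by omega)
      push_cast
      convert this using 2
    rw [h, List.foldl_append, ih]
    simp [List.range_succ, pvF]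

-- A's second loop over ans = [1!, …, N!] up to index bound m produces [Sf 1, …, Sf m]
theorem loopA2_eq (N : Nat) (m : Nat) (h1 : 1 ≤ m) (hm : m ≤ N) :
    (PySem.List.pyRange 1 (m : Int) 1).foldl
      (fun (arr : List Int) i =>
        arr ++ [(PySem.List.pyGetD arr (-1) 0) *
          PySem.List.pyGetD ((List.range N).map (fun k => pvF (k + 1))) i 0]) [1]
    = (List.range m).map (fun k => pvSf (k + 1)) := by
  induction m with
  | zero => omega
  | succ m ih =>
    by_cases hm1 : 1 ≤ m
    · have h : PySem.List.pyRange 1 ((↑(m + 1) : Int)) 1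
          = PySem.List.pyRange 1 ((m : Int)) 1 ++ [(m : Int)] := by
        have := PySem.List.pyRange_one_succ_right (a := 1) (b := (m : Int)) (by omega)
        push_cast
        convert this using 2
      rw [h, List.foldl_append, ih hm1 (by omega)]
      have hlast : PySem.List.pyGetD ((List.range m).map (fun k => pvSf (k + 1))) (-1) 0
          = pvSf m := by
        have hne : ((List.range m).map (fun k => pvSf (k + 1))) ≠ [] := by
          simp; omega
        rw [PySem.List.pyGetD_neg_one _ _ hne]
        rcases Nat.exists_eq_add_of_le hm1 with ⟨j, rfl⟩
        simp [List.range_succ, Nat.add_comm]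
      have hidx : PySem.List.pyGetD ((List.range N).map (fun k => pvF (k + 1))) ((m : Int)) 0
          = pvF (m + 1) := by
        rw [PySem.List.pyGetD_natCast]
        rw [List.getD_eq_getElem _ _ (by simp; omega)]
        simp
      simp only [List.foldl_cons, List.foldl_nil, hlast, hidx]
      simp [List.range_succ, pvSf]
    · have hm0 : m = 0 := by omega
      subst hm0
      rw [PySem.List.pyRange_one_eq_nil (by norm_num)]
      simp [pvSf, pvF]

-- B's single loop: state after n iterations is (n!, Sf n, [Sf 1, …, Sf n])
theorem loopB_eq (n : Nat) :
    (PySem.List.pyRange 1 ((n : Int) + 1) 1).foldl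
      (fun (s : Int × Int × List Int) i =>
        let fact := s.1 * i
        let sf := s.2.1 * fact
        (fact, sf, s.2.2 ++ [sf])) (1, 1, [])
    = (pvF n, pvSf n, (List.range n).map (fun k => pvSf (k + 1))) := by
  induction n with
  | zero => simp [PySem.List.pyRange_one_eq_nil, pvF, pvSf]
  | succ n ih =>
    have h : PySem.List.pyRange 1 ((↑(n + 1) : Int) + 1) 1
        = PySem.List.pyRange 1 ((n : Int) + 1) 1 ++ [(n : Int) + 1] := by
      have := PySem.List.pyRange_one_succ_right (a := 1) (b := (n : Int) + 1) (by omega)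
      push_cast
      convert this using 2
    rw [h, List.foldl_append, ih]
    simp [List.range_succ, pvF, pvSf]

-- ===== VERDICT =====
theorem super_fatorial_spec : Claim_equal_super_fatorial := by
  intro numero _ hpre
  unfold Spec_super_fatorial super_fatorial super_fatorial_alt
  have h2 : (2 : Int) ≤ numero := hpre
  obtain ⟨N, rfl⟩ : ∃ N : Nat, numero = (N : Int) :=
    ⟨numero.toNat, (Int.toNat_of_nonneg (by omega)).symm⟩
  have hN : 2 ≤ N := by exact_mod_cast h2
  rw [if_neg (by omega), if_neg (by omega), if_neg (by omega), if_neg (by omega)]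
  simp only [loopA1_eq, loopB_eq]
  have hlen : (((List.range N).map (fun k => pvF (k + 1))).length : Int) = (N : Int) := by simp
  rw [hlen, loopA2_eq N N (by omega) le_rfl]
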